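-- pv_equiv track=rewrite | github.com/CNDPlab/TextSummarization | Predictor/Utils/score_func.py | cutting_mask
-- ===== SOURCE A (Python) =====
-- def cutting_mask(input_list, eos_id):
--     nlist = []
--     for i in input_list[1:]:
--         if i != eos_id:
--             nlist.append(i)
--         else:
--             break
--     return nlist
-- ===== SOURCE B (Python) =====
-- def cutting_mask(input_list, eos_id):
--     sub = input_list[1:]
--     idx = sub.index(eos_id) if eos_id in sub else len(sub)
--     return sub[:idx]
-- ===== Notes on version B (the rewrite author's own statement) =====
-- stated objective: simpler
-- what changed: Replaces the incremental append-and-break loop with a boundary-then-slice decomposition: take the tail, find the first index of eos_id (or the tail's length if absent), and slice up to it.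
import Mathlib
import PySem

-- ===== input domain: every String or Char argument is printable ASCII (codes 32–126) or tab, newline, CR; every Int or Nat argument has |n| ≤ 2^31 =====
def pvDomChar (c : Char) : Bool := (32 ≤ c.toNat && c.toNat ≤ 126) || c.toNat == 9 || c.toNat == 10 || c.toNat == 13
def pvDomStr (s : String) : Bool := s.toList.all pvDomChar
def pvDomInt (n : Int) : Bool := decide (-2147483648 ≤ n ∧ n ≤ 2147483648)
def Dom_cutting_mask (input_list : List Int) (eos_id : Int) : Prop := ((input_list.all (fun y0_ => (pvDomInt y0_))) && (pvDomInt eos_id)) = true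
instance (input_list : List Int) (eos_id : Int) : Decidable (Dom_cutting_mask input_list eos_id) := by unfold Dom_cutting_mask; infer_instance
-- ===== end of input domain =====

-- B rephrases A's append-and-break loop as boundary-then-slice (find first eos index, slice); same O(n) cost, simpler.

-- ===== PORT A =====
-- the for-loop with break: accumulate until eos_id is met
def cuttingLoop (eos_id : Int) (acc : List Int) : List Int → List Int
  | [] => acc
  | i :: rest => if i ≠ eos_id then cuttingLoop eos_id (acc ++ [i]) rest else acc

def cutting_mask (input_list : List Int) (eos_id : Int) : List Int :=
  cuttingLoop eos_id [] (PySem.List.slice input_list (some 1) none)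

-- ===== PORT B =====
def cutting_mask_alt (input_list : List Int) (eos_id : Int) : List Int :=
  let sub := PySem.List.slice input_list (some 1) none
  let idx : Nat := match PySem.List.index? sub eos_id with
    | some i => i
    | none => sub.length
  PySem.List.slice sub none (some (idx : Int))

-- ===== PRECONDITION & SPEC =====
def Spec_cutting_mask (input_list : List Int) (eos_id : Int) (out : List Int) : Prop := out = cutting_mask_alt input_list eos_id
instance (input_list : List Int) (eos_id : Int) (out : List Int) : Decidable (Spec_cutting_mask input_list eos_id out) := by unfold Spec_cutting_mask; infer_instance

-- ===== CLAIM (what is proved, stated in full; the proofs are below) =====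
def Claim_equal_cutting_mask : Prop := ∀ (input_list : List Int) (eos_id : Int), Dom_cutting_mask input_list eos_id → Spec_cutting_mask input_list eos_id (cutting_mask input_list eos_id)

-- ===== LEMMAS AND PROOFS =====
theorem cuttingLoop_eq_take (eos_id : Int) (l : List Int) : ∀ acc : List Int,
    cuttingLoop eos_id acc l =
      acc ++ l.take (match PySem.List.index? l eos_id with
                     | some i => i
                     | none => l.length) := by
  induction l with
  | nil => intro acc; simp [cuttingLoop]
  | cons i rest ih =>
    intro acc
    by_cases h : i = eos_id
    · subst h
      rw [PySem.List.index?_cons_self]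
      simp [cuttingLoop]
    · rw [PySem.List.index?_cons_of_ne (h := h)]
      simp only [cuttingLoop, if_pos h]
      rw [ih]
      cases hx : PySem.List.index? rest eos_id with
      | none => simp
      | some k => simp

-- ===== VERDICT (by name: the statement is the Claim_ definition above) =====
theorem cutting_mask_spec : Claim_equal_cutting_mask := by
  intro input_list eos_id _
  unfold Spec_cutting_mask cutting_mask cutting_mask_alt
  rw [cuttingLoop_eq_take]
  simp [PySem.List.slice_to_natCast]
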